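-- pv_equiv track=rewrite | github.com/williamhernandezlimon/coding_practice | src/data_structure/array.py | storage
-- ===== SOURCE A (Python) =====
-- def storage(n, m, h, v):
-- 	"""
-- 	Amazon online assessment
-- 	Amazon is experimenting with a flexible storage system for their
-- 	warehouses. The storage unit consists of a shelving system which
-- 	is one meter deep with removable vertical and horizontal separators.
-- 	When all separators are installed, each storage space is
-- 	one cubic meter (1'x1'x1').
--
-- 	n: horizontal separators
-- 	m: vertical separator
-- 	h: horizontals to be removed
-- 	v: verticals to be be removed
-- 	return:
-- 		the volume of the alrgest space when a series of
-- 		horizontal and vertical separators are removed.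
-- 	complexity:
-- 		time: O(N)
-- 		space: O(N)
-- 	"""
-- 	max_h_gap = 0
-- 	max_v_gap = 0
--
-- 	# convert list to set for O(1) lookup time
-- 	h = set(h)
-- 	v = set(v)
--
-- 	# store max h gap
-- 	h_gap = 1
-- 	for i in range(n+1):
-- 		# if gap increment space
-- 		if i in h:
-- 			h_gap += 1
-- 		# if not gap, reset
-- 		else:
-- 			h_gap = 1
--
-- 		max_h_gap = max(max_h_gap, h_gap)
--
-- 	# store max v gap
-- 	v_gap = 1
-- 	for i in range(m+1):
-- 		if i in v:
-- 			v_gap += 1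
-- 		else:
-- 			v_gap = 1
-- 		max_v_gap = max(max_v_gap, v_gap)
--
--
-- 	# return max_h_gap * max_v_gap
-- 	return max_h_gap * max_v_gap
-- ===== SOURCE B (Python) =====
-- def storage(n, m, h, v):
-- 	def max_gap(k, removed):
-- 		# largest number of consecutive unit cells merged along this axis:
-- 		# 1 + longest run of consecutive removed separator indices within [0, k]
-- 		if k < 0:
-- 			return 0
-- 		s = sorted({x for x in removed if 0 <= x <= k})
-- 		best = 0
-- 		cur = 0
-- 		prev = None
-- 		for x in s:
-- 			cur = cur + 1 if prev is not None and x == prev + 1 else 1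
-- 			if cur > best:
-- 				best = cur
-- 			prev = x
-- 		return best + 1
-- 	return max_gap(n, h) * max_gap(m, v)
-- ===== Notes on version B (the rewrite author's own statement) =====
-- stated objective: faster
-- what changed: Instead of scanning every index 0..n and 0..m and testing set membership, B sorts the removed indices clamped to range and measures the longest run of consecutive values in one pass over the (typically short) removal lists.
import Mathlib
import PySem

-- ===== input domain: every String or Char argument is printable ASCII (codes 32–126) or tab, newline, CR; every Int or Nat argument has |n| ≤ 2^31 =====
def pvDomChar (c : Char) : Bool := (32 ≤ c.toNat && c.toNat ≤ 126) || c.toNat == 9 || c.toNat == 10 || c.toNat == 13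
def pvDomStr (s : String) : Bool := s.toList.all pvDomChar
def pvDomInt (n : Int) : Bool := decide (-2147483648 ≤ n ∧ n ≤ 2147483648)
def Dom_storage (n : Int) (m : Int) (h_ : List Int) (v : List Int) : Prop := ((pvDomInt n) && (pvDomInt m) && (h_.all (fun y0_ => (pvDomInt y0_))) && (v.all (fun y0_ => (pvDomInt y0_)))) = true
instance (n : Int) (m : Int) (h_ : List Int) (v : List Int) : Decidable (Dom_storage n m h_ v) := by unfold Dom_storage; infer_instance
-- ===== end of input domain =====

-- B replaces A's scan of every separator index 0..n / 0..m by sorting the removed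
-- indices (clamped to range) and measuring the longest consecutive run: faster when
-- the removal lists are short relative to n and m.

-- ===== PORT A =====
-- literal transliteration of A: two scans over range(n+1)/range(m+1) keeping
-- (max_gap, gap), membership tested in set(h)/set(v)
def storage (n : Int) (m : Int) (h_ : List Int) (v : List Int) : Int :=
  let hset : PySem.Set Int := PySem.Set.ofList h_
  let vset : PySem.Set Int := PySem.Set.ofList v
  let ph := (PySem.List.pyRange 0 (n + 1) 1).foldl
    (fun (st : Int × Int) i =>
      let g := if PySem.Set.contains hset i then st.2 + 1 else 1
      (max st.1 g, g)) (0, 1)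
  let pv := (PySem.List.pyRange 0 (m + 1) 1).foldl
    (fun (st : Int × Int) i =>
      let g := if PySem.Set.contains vset i then st.2 + 1 else 1
      (max st.1 g, g)) (0, 1)
  ph.1 * pv.1

-- ===== PORT B =====
-- B's helper max_gap: sorted clamped removal set, longest consecutive run + 1
def maxGapAlt (k : Int) (removed : List Int) : Int :=
  if k < 0 then 0
  else
    let s := PySem.List.sorted
      (PySem.Set.ofList (removed.filter (fun x => decide (0 ≤ x) && decide (x ≤ k))))
      (fun x => x) false
    let st := s.foldl
      (fun (st : Int × Int × Option Int) x =>
        let cur := match st.2.2 with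
          | some p => if x = p + 1 then st.2.1 + 1 else 1
          | none => 1
        (max st.1 cur, cur, some x)) (0, 0, none)
    st.1 + 1

def storage_alt (n : Int) (m : Int) (h_ : List Int) (v : List Int) : Int :=
  maxGapAlt n h_ * maxGapAlt m v

-- ===== PRECONDITION & SPEC =====
def Spec_storage (n : Int) (m : Int) (h_ : List Int) (v : List Int) (out : Int) : Prop := out = storage_alt n m h_ v
instance (n : Int) (m : Int) (h_ : List Int) (v : List Int) (out : Int) : Decidable (Spec_storage n m h_ v out) := by unfold Spec_storage; infer_instance

-- ===== CLAIM (what is proved, stated in full; the proofs are below) =====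
def Claim_equal_storage : Prop := ∀ (n : Int) (m : Int) (h_ : List Int) (v : List Int), Dom_storage n m h_ v → Spec_storage n m h_ v (storage n m h_ v)

-- ===== LEMMAS AND PROOFS =====

-- A-side fold over range(k+1)
def foldA (S : PySem.Set Int) (t : Int) : Int × Int :=
  (PySem.List.pyRange 0 t 1).foldl
    (fun (st : Int × Int) i =>
      let g := if PySem.Set.contains S i then st.2 + 1 else 1
      (max st.1 g, g)) (0, 1)

-- B-side fold over a sorted list
def foldB (l : List Int) : Int × Int × Option Int :=
  l.foldl
    (fun (st : Int × Int × Option Int) x =>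
      let cur := match st.2.2 with
        | some p => if x = p + 1 then st.2.1 + 1 else 1
        | none => 1
      (max st.1 cur, cur, some x)) (0, 0, none)

-- canonical increasing enumeration of S ∩ [0, t)
def runsList (S : PySem.Set Int) (t : Int) : List Int :=
  (PySem.List.pyRange 0 t 1).filter (fun i => PySem.Set.contains S i)

theorem foldB_append (l : List Int) (x : Int) :
    foldB (l ++ [x]) =
      (max (foldB l).1 (match (foldB l).2.2 with
         | some p => if x = p + 1 then (foldB l).2.1 + 1 else 1
         | none => 1),
       (match (foldB l).2.2 with
         | some p => if x = p + 1 then (foldB l).2.1 + 1 else 1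
         | none => 1), some x) := by
  simp only [foldB, List.foldl_append, List.foldl_cons, List.foldl_nil]

theorem foldA_succ (S : PySem.Set Int) (t : Int) (ht : 0 ≤ t) :
    foldA S (t + 1) =
      (max (foldA S t).1 (if PySem.Set.contains S t then (foldA S t).2 + 1 else 1),
       if PySem.Set.contains S t then (foldA S t).2 + 1 else 1) := by
  rw [foldA, PySem.List.pyRange_one_succ_right (a:=0) ht,
    List.foldl_append, List.foldl_cons, List.foldl_nil]
  rfl

theorem runsList_succ (S : PySem.Set Int) (t : Int) (ht : 0 ≤ t) :
    runsList S (t + 1) =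
      runsList S t ++ (if PySem.Set.contains S t then [t] else []) := by
  rw [runsList, runsList, PySem.List.pyRange_one_succ_right (a:=0) ht, List.filter_append]
  by_cases hm : t ∈ S <;> simp [hm]

-- the coupled invariant, for t ≥ 1
theorem invariant (S : PySem.Set Int) (t : Int) (ht : 1 ≤ t) :
    (foldA S t).1 = (foldB (runsList S t)).1 + 1 ∧
    (foldA S t).2 = (match (foldB (runsList S t)).2.2 with
      | some p => if p = t - 1 then (foldB (runsList S t)).2.1 + 1 else 1
      | none => 1) ∧
    (∀ p, (foldB (runsList S t)).2.2 = some p → p < t) ∧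
    0 ≤ (foldB (runsList S t)).2.1 ∧
    0 ≤ (foldB (runsList S t)).1 := by
  induction t, ht using Int.le_induction with
  | base =>
    have h1 : PySem.List.pyRange 0 1 1 = [0] := PySem.List.pyRange_one_singleton 0
    by_cases h0 : (0 : Int) ∈ S
    · refine ⟨?_, ?_, ?_, ?_, ?_⟩ <;>
        simp [foldA, foldB, runsList, h1, h0]
    · refine ⟨?_, ?_, ?_, ?_, ?_⟩ <;>
        simp [foldA, foldB, runsList, h1, h0]
  | succ t ht ih =>
    have ht0 : (0 : Int) ≤ t := by omega
    have htt : t + 1 - 1 = t := by ring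
    rcases hB : foldB (runsList S t) with ⟨B, C, P⟩
    rw [hB] at ih
    obtain ⟨ih1, ih2, ih3, ih4, ih5⟩ := ih
    rw [foldA_succ S t ht0, runsList_succ S t ht0]
    by_cases hmem : PySem.Set.contains S t = true
    · rw [if_pos hmem, if_pos hmem, foldB_append, hB]
      rcases P with _ | p
      · have ih2' : (foldA S t).2 = 1 := ih2
        refine ⟨?_, ?_, ?_, ?_, ?_⟩
        · show max (foldA S t).1 ((foldA S t).2 + 1) = max B 1 + 1
          omega
        · show (foldA S t).2 + 1 = if t = t + 1 - 1 then 1 + 1 else 1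
          rw [htt, if_pos rfl]; omega
        · intro q hq
          have : t = q := by simpa using hq
          omega
        · show (0 : Int) ≤ 1; omega
        · show (0 : Int) ≤ max B 1; omega
      · have ih2' : (foldA S t).2 = if p = t - 1 then C + 1 else 1 := ih2
        have hplt : p < t := ih3 p rfl
        have hiff : (t = p + 1) ↔ (p = t - 1) := by omega
        refine ⟨?_, ?_, ?_, ?_, ?_⟩
        · show max (foldA S t).1 ((foldA S t).2 + 1)
            = max B (if t = p + 1 then C + 1 else 1) + 1
          by_cases hc : t = p + 1
          · rw [if_pos hc, if_pos (hiff.mp hc)] at *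
            rw [ih2']; omega
          · rw [if_neg hc, if_neg (fun h => hc (hiff.mpr h))] at *
            rw [ih2']; omega
        · show (foldA S t).2 + 1
            = if t = t + 1 - 1 then (if t = p + 1 then C + 1 else 1) + 1 else 1
          rw [htt, if_pos rfl]
          by_cases hc : t = p + 1
          · rw [if_pos hc, ih2', if_pos (hiff.mp hc)]
          · rw [if_neg hc, ih2', if_neg (fun h => hc (hiff.mpr h))]
        · intro q hq
          have : t = q := by simpa using hq
          omega
        · show (0 : Int) ≤ if t = p + 1 then C + 1 else 1
          have ih4' : (0 : Int) ≤ C := ih4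
          by_cases hc : t = p + 1
          · rw [if_pos hc]; omega
          · rw [if_neg hc]; omega
        · show (0 : Int) ≤ max B (if t = p + 1 then C + 1 else 1)
          omega
    · have hmem'' : ¬ PySem.Set.contains S t := hmem
      rw [if_neg hmem'', if_neg hmem'', List.append_nil, hB]
      rcases P with _ | p
      · have ih2' : (foldA S t).2 = 1 := ih2
        refine ⟨?_, ?_, ?_, ?_, ?_⟩
        · show max (foldA S t).1 1 = B + 1
          omega
        · show (1 : Int) = 1
          rfl
        · intro q hq; simp at hq
        · exact ih4
        · exact ih5
      · have ih2' : (foldA S t).2 = if p = t - 1 then C + 1 else 1 := ih2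
        have hplt : p < t := ih3 p rfl
        have hne : ¬ p = t + 1 - 1 := by omega
        refine ⟨?_, ?_, ?_, ?_, ?_⟩
        · show max (foldA S t).1 1 = B + 1
          omega
        · show (1 : Int) = if p = t + 1 - 1 then C + 1 else 1
          rw [if_neg hne]
        · intro q hq
          have : p = q := by simpa using hq
          omega
        · exact ih4
        · exact ih5

-- sorted(clamped set) IS runsList
theorem sorted_eq_runsList (k : Int) (xs : List Int) :
    PySem.List.sorted
      (PySem.Set.ofList (xs.filter (fun x => decide (0 ≤ x) && decide (x ≤ k))))
      (fun x => x) false = runsList (PySem.Set.ofList xs) (k + 1) := by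
  apply PySem.List.sorted_eq_of_perm_of_pairwise_lt
  · rw [List.perm_ext_iff_of_nodup]
    · intro a
      constructor
      · intro hmem
        obtain ⟨h1, h2⟩ := List.mem_filter.mp hmem
        rw [PySem.List.mem_pyRange_one] at h1
        have hx : a ∈ xs := by
          simpa [PySem.Set.contains_iff, PySem.Set.mem_ofList] using h2
        exact (PySem.Set.mem_ofList _ _).mpr
          (List.mem_filter.mpr ⟨hx, by simp; omega⟩)
      · intro hmem
        have hf := (PySem.Set.mem_ofList _ _).mp hmem
        have h2 := (List.mem_filter.mp hf).2
        have h1 : a ∈ PySem.List.pyRange 0 (k + 1) 1 := by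
          rw [PySem.List.mem_pyRange_one]; simp at h2; omega
        exact List.mem_filter.mpr ⟨h1, by
          simp [PySem.Set.mem_ofList, (List.mem_filter.mp hf).1]⟩
    · exact (PySem.List.nodup_pyRange_one 0 (k + 1)).filter _
    · exact PySem.Set.nodup_ofList _
  · exact (PySem.List.pairwise_lt_pyRange_one 0 (k + 1)).filter _

theorem maxGap_eq (k : Int) (xs : List Int) :
    (foldA (PySem.Set.ofList xs) (k + 1)).1 = maxGapAlt k xs := by
  by_cases hk : k < 0
  · have h0 : k + 1 ≤ 0 := by omega
    simp [foldA, maxGapAlt, hk, PySem.List.pyRange_one_eq_nil (a := 0) h0]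
  · have h1 : (1 : Int) ≤ k + 1 := by omega
    have hinv := (invariant (PySem.Set.ofList xs) (k + 1) h1).1
    simp only [maxGapAlt, hk, if_false]
    rw [sorted_eq_runsList]
    exact hinv.trans (by rw [foldB])

-- ===== VERDICT (by name: the statement is the Claim_ definition above) =====
theorem storage_spec : Claim_equal_storage := by
  intro n m h_ v _
  show storage n m h_ v = storage_alt n m h_ v
  show (foldA (PySem.Set.ofList h_) (n + 1)).1 * (foldA (PySem.Set.ofList v) (m + 1)).1
      = maxGapAlt n h_ * maxGapAlt m v
  rw [maxGap_eq, maxGap_eq]
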